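-- pv_equiv track=rewrite | github.com/paradise-fi/RoFI | tools/padWalking/mapGenerator.py | __getXRange
-- ===== SOURCE A (Python) =====
-- def __getXRange(vertices):
--     initV = vertices[0]
--     minX = initV[0]
--     maxX = initV[0]
--     for v in vertices:
--         if v[0] < minX:
--             minX = v[0]
--         if v[0] > maxX:
--             maxX = v[0]
--     return maxX - minX + 1
-- ===== SOURCE B (Python) =====
-- def __getXRange(vertices):
--     xs = sorted(v[0] for v in vertices)
--     return xs[-1] - xs[0] + 1
-- ===== Notes on version B (the rewrite author's own statement) =====
-- stated objective: alternative
-- what changed: Replaced A's single manual min/max tracking scan by sorting the x-coordinates and taking the endpoints of the sorted list (sort-then-endpoints).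
import Mathlib
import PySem

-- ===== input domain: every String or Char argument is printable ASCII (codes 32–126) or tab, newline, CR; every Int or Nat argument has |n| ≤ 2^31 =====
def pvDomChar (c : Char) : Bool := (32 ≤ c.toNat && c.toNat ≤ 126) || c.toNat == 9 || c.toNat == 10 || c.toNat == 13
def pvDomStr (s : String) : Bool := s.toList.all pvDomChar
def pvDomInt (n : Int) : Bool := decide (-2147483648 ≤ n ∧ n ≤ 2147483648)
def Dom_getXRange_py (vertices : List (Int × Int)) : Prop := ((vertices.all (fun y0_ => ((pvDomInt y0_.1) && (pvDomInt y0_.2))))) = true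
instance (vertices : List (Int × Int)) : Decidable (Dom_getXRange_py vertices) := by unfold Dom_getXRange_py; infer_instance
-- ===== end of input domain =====

-- B sorts the x-coordinates and takes the endpoints of the sorted list instead of A's manual min/max tracking scan (alternative algorithm; return value only).
-- ===== PORT A =====
def getXRange_py (vertices : List (Int × Int)) : Int :=
  match vertices with
  | [] => 0  -- Python: vertices[0] raises IndexError here; excluded by Pre_
  | initV :: _ =>
    let st := vertices.foldl
      (fun (p : Int × Int) v =>
        let p1 := if v.1 < p.1 then (v.1, p.2) else p
        if v.1 > p1.2 then (p1.1, v.1) else p1)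
      (initV.1, initV.1)
    st.2 - st.1 + 1

-- ===== PORT B =====
def getXRange_py_alt (vertices : List (Int × Int)) : Int :=
  let xs := PySem.List.sorted (vertices.map (fun v => v.1)) (fun x => x) false
  -- xs[-1] and xs[0]: pyGet? is none exactly when Python raises IndexError (empty list, excluded by Pre_)
  (PySem.List.pyGet? xs (-1)).getD 0 - (PySem.List.pyGet? xs 0).getD 0 + 1

-- ===== PRECONDITION & SPEC =====
-- Pre_ excludes only the empty list, on which both Pythons raise IndexError.
def Pre_getXRange_py (vertices : List (Int × Int)) : Prop := vertices ≠ []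
instance (vertices : List (Int × Int)) : Decidable (Pre_getXRange_py vertices) := by unfold Pre_getXRange_py; infer_instance
def pvWitness_getXRange_py : (List (Int × Int)) := [(0, 1), (3, 2)]
def Spec_getXRange_py (vertices : List (Int × Int)) (out : Int) : Prop := out = getXRange_py_alt vertices
instance (vertices : List (Int × Int)) (out : Int) : Decidable (Spec_getXRange_py vertices out) := by unfold Spec_getXRange_py; infer_instance

-- ===== CLAIM (what is proved, stated in full; the proofs are below) =====
def Claim_equal_getXRange_py : Prop := ∀ (vertices : List (Int × Int)), Dom_getXRange_py vertices → Pre_getXRange_py vertices → Spec_getXRange_py vertices (getXRange_py vertices)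

-- ===== LEMMAS AND PROOFS =====
theorem stepA_eq (p : Int × Int) (v : Int × Int) :
    (let p1 := if v.1 < p.1 then (v.1, p.2) else p
     if v.1 > p1.2 then (p1.1, v.1) else p1)
    = (min p.1 v.1, max p.2 v.1) := by
  rcases p with ⟨a, b⟩
  simp only [min_def, max_def]
  split_ifs <;> simp_all <;> omega

theorem foldA_eq (l : List (Int × Int)) (a b : Int) :
    l.foldl
      (fun (p : Int × Int) v =>
        let p1 := if v.1 < p.1 then (v.1, p.2) else p
        if v.1 > p1.2 then (p1.1, v.1) else p1)
      (a, b)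
    = (l.foldl (fun m v => min m v.1) a, l.foldl (fun m v => max m v.1) b) := by
  simp only [stepA_eq]
  induction l generalizing a b with
  | nil => rfl
  | cons x t ih => simp only [List.foldl_cons, ih]

theorem foldl_min_mem (xs : List Int) (a : Int) : xs.foldl min a ∈ a :: xs := by
  induction xs generalizing a with
  | nil => simp
  | cons x t ih =>
    simp only [List.foldl_cons]
    rcases List.mem_cons.mp (ih (min a x)) with h | h
    · rw [h]; rcases min_choice a x with hm | hm <;> simp [hm]
    · simp [h]

theorem foldl_min_le (xs : List Int) (a : Int) : ∀ y ∈ a :: xs, xs.foldl min a ≤ y := by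
  induction xs generalizing a with
  | nil => simp
  | cons x t ih =>
    intro y hy
    simp only [List.foldl_cons]
    rcases List.mem_cons.mp hy with h1 | hy'
    · subst h1; exact le_trans (ih (min y x) _ (by simp)) (min_le_left y x)
    · rcases List.mem_cons.mp hy' with h1 | hy''
      · subst h1; exact le_trans (ih (min a y) _ (by simp)) (min_le_right a y)
      · exact ih (min a x) y (by simp [hy''])

theorem foldl_max_mem (xs : List Int) (a : Int) : xs.foldl max a ∈ a :: xs := by
  induction xs generalizing a with
  | nil => simp
  | cons x t ih =>
    simp only [List.foldl_cons]
    rcases List.mem_cons.mp (ih (max a x)) with h | h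
    · rw [h]; rcases max_choice a x with hm | hm <;> simp [hm]
    · simp [h]

theorem foldl_max_ge (xs : List Int) (a : Int) : ∀ y ∈ a :: xs, y ≤ xs.foldl max a := by
  induction xs generalizing a with
  | nil => simp
  | cons x t ih =>
    intro y hy
    simp only [List.foldl_cons]
    rcases List.mem_cons.mp hy with h1 | hy'
    · subst h1; exact le_trans (le_max_left y x) (ih (max y x) _ (by simp))
    · rcases List.mem_cons.mp hy' with h1 | hy''
      · subst h1; exact le_trans (le_max_right a y) (ih (max a y) _ (by simp))
      · exact ih (max a x) y (by simp [hy''])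

-- ===== VERDICT (by name: the statement is the Claim_ definition above) =====
theorem getXRange_py_spec : Claim_equal_getXRange_py := by
  intro vertices _ hpre
  unfold Spec_getXRange_py
  match vertices, hpre with
  | v0 :: t, _ =>
    set l : List Int := (v0 :: t).map (fun v => v.1) with hl
    set s := PySem.List.sorted l (fun x => x) false with hs
    have hperm : s.Perm l := PySem.List.sorted_perm ..
    have hsne : s ≠ [] := by
      intro h
      have := hperm.length_eq
      simp [h, hl] at this
    obtain ⟨h0, s', hcons⟩ := List.exists_cons_of_ne_nil hsne
    -- head of sorted is the minimum; last is the maximum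
    have hmemhead : h0 ∈ l := hperm.mem_iff.mp (by simp [hcons])
    have hheadle : ∀ y ∈ l, h0 ≤ y := by
      intro y hy
      exact PySem.List.key_head_sorted_le (key := fun x => x) (xs := l) (by rw [← hs, hcons]) y hy
    have hslen : 0 < s.length := by simp [hcons]
    have hlastmem : s.getLast hsne ∈ l := hperm.mem_iff.mp (List.getLast_mem hsne)
    have hlastge : ∀ y ∈ l, y ≤ s.getLast hsne := by
      intro y hy
      obtain ⟨q, hq, hqy⟩ := List.getElem_of_mem (hperm.mem_iff.mpr hy)
      rw [← hqy, List.getLast_eq_getElem]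
      exact PySem.List.key_sorted_getElem_mono (key := fun x => x) (xs := l)
        (p := q) (q := s.length - 1) (by omega) (by rw [← hs]; omega)
    -- A's fold values
    have hfold := foldA_eq (v0 :: t) v0.1 v0.1
    set mn := t.foldl (fun m v => min m v.1) v0.1 with hmn
    set mx := t.foldl (fun m v => max m v.1) v0.1 with hmx
    have hmn' : (v0 :: t).foldl (fun m v => min m v.1) v0.1 = mn := by
      simp [List.foldl_cons, hmn]
    have hmx' : (v0 :: t).foldl (fun m v => max m v.1) v0.1 = mx := by
      simp [List.foldl_cons, hmx]
    have hmnfold : mn = (t.map (fun v => v.1)).foldl min v0.1 := by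
      rw [hmn, List.foldl_map]
    have hmxfold : mx = (t.map (fun v => v.1)).foldl max v0.1 := by
      rw [hmx, List.foldl_map]
    have hmnmem : mn ∈ l := by rw [hmnfold, hl]; exact foldl_min_mem ..
    have hmnle : ∀ y ∈ l, mn ≤ y := by
      rw [hmnfold, hl]; intro y hy
      exact foldl_min_le _ _ y (by simpa using hy)
    have hmxmem : mx ∈ l := by rw [hmxfold, hl]; exact foldl_max_mem ..
    have hmxge : ∀ y ∈ l, y ≤ mx := by
      rw [hmxfold, hl]; intro y hy
      exact foldl_max_ge _ _ y (by simpa using hy)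
    have hminEq : h0 = mn := le_antisymm (hheadle _ hmnmem) (hmnle _ hmemhead)
    have hmaxEq : s.getLast hsne = mx := le_antisymm (hmxge _ hlastmem) (hlastge _ hmxmem)
    -- evaluate both ports
    have hA : getXRange_py (v0 :: t) = mx - mn + 1 := by
      simp only [getXRange_py, hfold, hmn', hmx']
    have hget0 : PySem.List.pyGet? s 0 = some h0 := by
      simp [PySem.List.pyGet?, PySem.List.pyIdx?, hcons]
    have hgetm1 : PySem.List.pyGet? s (-1) = some (s.getLast hsne) := by
      simp only [PySem.List.pyGet?, PySem.List.pyIdx?]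
      rw [if_neg (by omega), if_pos (by omega)]
      have h1 : s.length - (-(-1 : Int)).toNat = s.length - 1 := by norm_num
      rw [h1]
      simp only [Option.bind_some]
      rw [List.getLast_eq_getElem, List.getElem?_eq_getElem (by omega)]
    have hB : getXRange_py_alt (v0 :: t) = s.getLast hsne - h0 + 1 := by
      simp only [getXRange_py_alt, ← hl, ← hs, hget0, hgetm1, Option.getD_some]
    rw [hA, hB, hminEq, hmaxEq]
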